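-- pv_equiv track=rewrite | github.com/tech-srl/c3po | DataCreation/diff_symbolizer.py | fix_stars
-- ===== SOURCE A (Python) =====
-- def fix_stars(symbols):
--     def aux(generator):
--         found = False
--         for i in generator:
--             if symbols[i] == '*':
--                 found = True
--             elif symbols[i] == '=':
--                 found = False
--             elif found is True:
--                 symbols[i] = '*'
--
--     aux(range(len(symbols)))
--     aux(reversed(range(len(symbols))))
--     return symbols
-- ===== SOURCE B (Python) =====
-- def fix_stars(symbols):
--     # One pass: track the start of the current '='-delimited segment and whether
--     # it contains a '*'; on a boundary ('=' or end), fill the segment with '*'.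
--     n = len(symbols)
--     start = 0
--     has_star = False
--     for i in range(n + 1):
--         if i == n or symbols[i] == '=':
--             if has_star:
--                 for j in range(start, i):
--                     symbols[j] = '*'
--             start = i + 1
--             has_star = False
--         elif symbols[i] == '*':
--             has_star = True
--     return symbols
-- ===== Notes on version B (the rewrite author's own statement) =====
-- stated objective: alternative
-- what changed: Replaced the two directional '*'-propagation passes by a single pass that tracks the current '='-delimited segment's start and whether it saw a '*', filling the whole segment at each boundary.
import Mathlib
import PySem

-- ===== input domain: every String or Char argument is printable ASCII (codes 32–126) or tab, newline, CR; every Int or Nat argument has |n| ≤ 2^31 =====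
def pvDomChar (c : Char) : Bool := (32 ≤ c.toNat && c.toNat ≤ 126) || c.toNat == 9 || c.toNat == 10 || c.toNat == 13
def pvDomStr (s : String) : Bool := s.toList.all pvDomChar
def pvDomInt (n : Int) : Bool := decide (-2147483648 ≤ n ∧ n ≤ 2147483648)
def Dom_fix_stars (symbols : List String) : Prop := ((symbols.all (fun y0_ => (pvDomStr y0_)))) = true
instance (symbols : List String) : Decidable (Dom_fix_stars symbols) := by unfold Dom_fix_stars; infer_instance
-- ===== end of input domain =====

-- B replaces A's two directional '*'-propagation passes by a single segment-tracking
-- pass (alternative decomposition, same complexity). Both Pythons mutate `symbols` in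
-- place and return the same object; the theorems here are about the returned value.

-- ===== PORT A =====
-- one iteration of A's inner `aux` loop body; state = (symbols, found)
def fsStep (st : List String × Bool) (i : Nat) : List String × Bool :=
  if st.1.getD i "" = "*" then (st.1, true)
  else if st.1.getD i "" = "=" then (st.1, false)
  else if st.2 = true then (st.1.set i "*", st.2)
  else (st.1, st.2)

def fix_stars (symbols : List String) : List String :=
  let s1 := ((List.range symbols.length).foldl fsStep (symbols, false)).1
  (((List.range symbols.length).reverse).foldl fsStep (s1, false)).1

-- ===== PORT B =====
-- `for j in range(start, i): symbols[j] = '*'`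
def fsFill (s : List String) (start stop : Nat) : List String :=
  (List.range' start (stop - start)).foldl (fun t j => t.set j "*") s

-- one iteration of B's loop body; state = (symbols, start, has_star)
def fsBStep (n : Nat) (st : List String × Nat × Bool) (i : Nat) : List String × Nat × Bool :=
  if i = n ∨ st.1.getD i "" = "=" then
    (if st.2.2 = true then fsFill st.1 st.2.1 i else st.1, i + 1, false)
  else if st.1.getD i "" = "*" then (st.1, st.2.1, true)
  else st

def fix_stars_alt (symbols : List String) : List String :=
  ((List.range (symbols.length + 1)).foldl (fsBStep symbols.length) (symbols, 0, false)).1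

-- ===== PRECONDITION & SPEC =====
def Spec_fix_stars (symbols : List String) (out : List String) : Prop := out = fix_stars_alt symbols
instance (symbols : List String) (out : List String) : Decidable (Spec_fix_stars symbols out) := by unfold Spec_fix_stars; infer_instance

-- ===== CLAIM (what is proved, stated in full; the proofs are below) =====
def Claim_equal_fix_stars : Prop := ∀ (symbols : List String), Dom_fix_stars symbols → Spec_fix_stars symbols (fix_stars symbols)

-- ===== LEMMAS AND PROOFS =====

-- structural version of A's forward pass: returns (new list, final `found` flag)
def fwdP : Bool → List String → List String × Bool
  | f, [] => ([], f)
  | f, x :: xs =>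
    let f' := if x = "*" then true else if x = "=" then false else f
    let x' := if x = "*" ∨ x = "=" then x else if f then "*" else x
    (x' :: (fwdP f' xs).1, (fwdP f' xs).2)

-- structural version of A's backward pass, processed right-to-left;
-- `g` is the `found` flag entering at the right end
def bwdPf : Bool → List String → List String × Bool
  | g, [] => ([], g)
  | g, x :: xs =>
    let f := (bwdPf g xs).2
    let f' := if x = "*" then true else if x = "=" then false else f
    let x' := if x = "*" ∨ x = "=" then x else if f then "*" else x
    (x' :: (bwdPf g xs).1, f')

-- is there a '*' in the current segment (before the next '=')?
def hasStar : List String → Bool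
  | [] => false
  | x :: xs => if x = "=" then false else (decide (x = "*") || hasStar xs)

-- common normal form: fill each non-'=' element with '*' iff a '*' occurs in its
-- segment (f = a '*' occurred earlier in the current segment)
def specA : Bool → List String → List String
  | _, [] => []
  | f, x :: xs =>
    if x = "=" then "=" :: specA false xs
    else (if f || decide (x = "*") || hasStar xs then "*" else x) :: specA (f || decide (x = "*")) xs

def flagA (f : Bool) : List String → Bool
  | [] => false
  | x :: xs => if x = "=" then false else (f || decide (x = "*") || hasStar xs)

def flushSeg (cur : List String) : List String :=
  if cur.contains "*" then List.replicate cur.length "*" else cur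

-- structural version of B: `cur` = scanned part of the current segment
def segSpec : List String → List String → List String
  | cur, [] => flushSeg cur
  | cur, x :: xs => if x = "=" then flushSeg cur ++ "=" :: segSpec [] xs else segSpec (cur ++ [x]) xs

theorem getD_append_self {α : Type} [Inhabited α] (pre : List α) (x : α) (l : List α) (d : α) :
    (pre ++ x :: l).getD pre.length d = x := by
  induction pre with
  | nil => simp
  | cons a t ih => simpa using ih

theorem set_append_self {α : Type} (pre : List α) (x y : α) (l : List α) :
    (pre ++ x :: l).set pre.length y = pre ++ y :: l := by
  induction pre with
  | nil => simp
  | cons a t ih => simpa using ih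

theorem fwdP_length (f : Bool) (s : List String) : (fwdP f s).1.length = s.length := by
  induction s generalizing f with
  | nil => rfl
  | cons x xs ih => simp [fwdP, ih]

theorem fold_fwd (xs : List String) : ∀ (pre : List String) (f : Bool),
    (List.range' pre.length xs.length).foldl fsStep (pre ++ xs, f)
      = (pre ++ (fwdP f xs).1, (fwdP f xs).2) := by
  induction xs with
  | nil => intro pre f; simp [fwdP]
  | cons x l ih =>
    intro pre f
    rw [List.length_cons, List.range'_succ, List.foldl_cons]
    have hstep : fsStep (pre ++ x :: l, f) pre.length
        = (pre ++ (if x = "*" ∨ x = "=" then x else if f then "*" else x) :: l,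
           if x = "*" then true else if x = "=" then false else f) := by
      simp only [fsStep, getD_append_self, set_append_self]
      by_cases h1 : x = "*" <;> by_cases h2 : x = "=" <;> cases f <;> simp [h1, h2]
    rw [hstep]
    have hre : pre ++ (if x = "*" ∨ x = "=" then x else if f then "*" else x) :: l
        = (pre ++ [(if x = "*" ∨ x = "=" then x else if f then "*" else x)]) ++ l := by simp
    have hlen : pre.length + 1 = (pre ++ [(if x = "*" ∨ x = "=" then x else if f then "*" else x)]).length := by simp
    rw [hre, hlen, ih]
    simp [fwdP]

theorem bwdPf_snoc (l : List String) (x : String) (g : Bool) :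
    bwdPf g (l ++ [x]) =
      ((bwdPf (if x = "*" then true else if x = "=" then false else g) l).1
         ++ [(if x = "*" ∨ x = "=" then x else if g then "*" else x)],
       (bwdPf (if x = "*" then true else if x = "=" then false else g) l).2) := by
  induction l with
  | nil => rfl
  | cons y t ih => simp [bwdPf, ih]

theorem fold_bwd (xs : List String) : ∀ (post : List String) (g : Bool),
    ((List.range xs.length).reverse).foldl fsStep (xs ++ post, g)
      = ((bwdPf g xs).1 ++ post, (bwdPf g xs).2) := by
  induction xs using List.reverseRecOn with
  | nil => intro post g; simp [bwdPf]
  | append_singleton l x ih =>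
    intro post g
    rw [List.length_append, List.length_singleton, List.range_succ, List.reverse_append,
        List.reverse_singleton, List.singleton_append, List.foldl_cons]
    have hassoc : (l ++ [x]) ++ post = l ++ x :: post := by simp
    have hstep : fsStep (l ++ [x] ++ post, g) l.length
        = (l ++ (if x = "*" ∨ x = "=" then x else if g then "*" else x) :: post,
           if x = "*" then true else if x = "=" then false else g) := by
      rw [hassoc]
      simp only [fsStep, getD_append_self, set_append_self]
      by_cases h1 : x = "*" <;> by_cases h2 : x = "=" <;> cases g <;> simp [h1, h2]
    rw [hstep, ih, bwdPf_snoc]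
    simp

theorem flagA_false (xs : List String) : flagA false xs = hasStar xs := by
  cases xs with
  | nil => rfl
  | cons y ys => simp [flagA, hasStar]

theorem bwd_fwd_spec (s : List String) : ∀ f, bwdPf false (fwdP f s).1 = (specA f s, flagA f s) := by
  induction s with
  | nil => intro f; rfl
  | cons x xs ih =>
    intro f
    by_cases h1 : x = "*"
    · subst h1
      simp [fwdP, bwdPf, ih true, specA, flagA]
    · by_cases h2 : x = "="
      · subst h2
        simp [fwdP, bwdPf, ih false, specA, flagA]
      · cases f with
        | true => simp [fwdP, h1, h2, bwdPf, ih true, specA, flagA]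
        | false =>
          simp only [fwdP, h1, h2, if_false, or_self, if_neg (by simp [h1, h2] : ¬(x = "*" ∨ x = "="))]
          simp only [bwdPf, ih false, flagA_false]
          simp [specA, flagA, hasStar, h1, h2]

theorem fill_fold (cur : List String) : ∀ (done rest : List String),
    (List.range' done.length cur.length).foldl (fun t j => t.set j "*") (done ++ cur ++ rest)
      = done ++ List.replicate cur.length "*" ++ rest := by
  induction cur with
  | nil => intro done rest; simp
  | cons c cs ih =>
    intro done rest
    rw [List.length_cons, List.range'_succ, List.foldl_cons]
    have h1 : (done ++ c :: cs ++ rest).set done.length "*" = (done ++ ["*"]) ++ cs ++ rest := by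
      simpa using set_append_self done c "*" (cs ++ rest)
    rw [h1, show done.length + 1 = (done ++ ["*"]).length by simp, ih]
    simp [List.replicate_succ]

theorem B_fold (rest : List String) : ∀ (done cur : List String), "=" ∉ cur →
    (List.range' (done.length + cur.length) (rest.length + 1)).foldl
        (fsBStep (done.length + cur.length + rest.length))
        (done ++ cur ++ rest, done.length, cur.contains "*")
      = (done ++ segSpec cur rest, done.length + cur.length + rest.length + 1, false) := by
  induction rest with
  | nil =>
    intro done cur hcur
    rw [List.length_nil, Nat.add_zero, List.range'_succ, List.range'_zero, List.foldl_cons, List.foldl_nil]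
    simp only [fsBStep, List.append_nil, true_or, if_true]
    by_cases h : cur.contains "*" = true
    · rw [if_pos h]
      unfold fsFill
      rw [show done.length + cur.length - done.length = cur.length by omega]
      have hf := fill_fold cur done []
      simp only [List.append_nil] at hf
      rw [hf, segSpec, flushSeg, if_pos h]
    · rw [if_neg h, segSpec, flushSeg, if_neg h]
  | cons x xs ih =>
    intro done cur hcur
    rw [List.length_cons, List.range'_succ, List.foldl_cons]
    have hget : (done ++ cur ++ x :: xs).getD (done.length + cur.length) "" = x := by
      have := getD_append_self (done ++ cur) x xs ""
      simpa using this
    by_cases h2 : x = "="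
    · subst h2
      have hstep : fsBStep (done.length + cur.length + (xs.length + 1))
          (done ++ cur ++ "=" :: xs, done.length, cur.contains "*") (done.length + cur.length)
          = (done ++ flushSeg cur ++ "=" :: xs, done.length + cur.length + 1, false) := by
        simp only [fsBStep, hget, or_true, if_true]
        by_cases h : cur.contains "*" = true
        · rw [if_pos h]
          unfold fsFill
          rw [show done.length + cur.length - done.length = cur.length by omega, fill_fold,
              flushSeg, if_pos h]
        · rw [if_neg h, flushSeg, if_neg h]
      rw [hstep]
      have hflen : (flushSeg cur).length = cur.length := by
        unfold flushSeg; split <;> simp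
      have h3 := ih (done ++ flushSeg cur ++ ["="]) [] (by simp)
      simp only [List.append_nil, List.append_assoc, List.singleton_append, List.length_append,
        List.length_cons, List.length_nil, Nat.add_zero, Nat.zero_add, hflen, List.contains_nil] at h3
      rw [show done.length + cur.length + (xs.length + 1)
            = done.length + (cur.length + 1) + xs.length by omega,
          show done.length + cur.length + 1 = done.length + (cur.length + 1) by omega,
          show segSpec cur ("=" :: xs) = flushSeg cur ++ "=" :: segSpec [] xs from by
            rw [segSpec, if_pos rfl]]
      simpa using h3
    · have hxn : ¬ (done.length + cur.length = done.length + cur.length + (xs.length + 1) ∨ x = "=") := by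
        push_neg; exact ⟨by omega, h2⟩
      have hcur' : ("=" : String) ∉ cur ++ [x] := by
        simp [hcur]; exact fun h => absurd h.symm h2
      have hstep : fsBStep (done.length + cur.length + (xs.length + 1))
          (done ++ cur ++ x :: xs, done.length, cur.contains "*") (done.length + cur.length)
          = (done ++ (cur ++ [x]) ++ xs, done.length, (cur ++ [x]).contains "*") := by
        simp only [fsBStep, hget, if_neg hxn]
        by_cases h1 : x = "*"
        · rw [if_pos h1]
          subst h1
          simp
        · rw [if_neg h1]
          have hc : ((cur ++ [x]).contains "*") = cur.contains "*" := by
            simp [List.contains_append, eq_comm, h1]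
          rw [hc]
          simp
      rw [hstep]
      rw [show done.length + cur.length + (xs.length + 1)
            = done.length + (cur ++ [x]).length + xs.length by simp; omega,
          show done.length + cur.length + 1 = done.length + (cur ++ [x]).length by simp; omega,
          ih done (cur ++ [x]) hcur']
      rw [show segSpec cur (x :: xs) = segSpec (cur ++ [x]) xs from by rw [segSpec, if_neg h2]]

theorem seg_bridge (rest : List String) : ∀ cur : List String,
    segSpec cur rest
      = (if cur.contains "*" || hasStar rest then List.replicate cur.length "*" else cur)
          ++ specA (cur.contains "*") rest := by
  induction rest with
  | nil => intro cur; simp [segSpec, flushSeg, specA, hasStar]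
  | cons x xs ih =>
    intro cur
    by_cases h2 : x = "="
    · subst h2
      rw [segSpec, if_pos rfl, ih []]
      by_cases hm : ("*" : String) ∈ cur
      · have hcu : cur.contains "*" = true := by simpa using hm
        simp [specA, hasStar, flushSeg, hcu, hm]
      · have hcu : cur.contains "*" = false := by simpa using hm
        simp [specA, hasStar, flushSeg, hcu, hm]
    · have hc : ((cur ++ [x]).contains "*") = (cur.contains "*" || decide (x = "*")) := by
        by_cases hx : x = "*"
        · simp [hx]
        · have hx' : ¬ ("*" : String) = x := fun h => hx h.symm
          simp [hx, hx']
      rw [segSpec, if_neg h2, ih (cur ++ [x]), hc]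
      by_cases hm : ("*" : String) ∈ cur
      · have hcu : cur.contains "*" = true := by simpa using hm
        by_cases hx : x = "*" <;> cases hs : hasStar xs <;>
          simp [specA, hasStar, h2, hx, hs, hcu, hm, List.replicate_succ']
      · have hcu : cur.contains "*" = false := by simpa using hm
        by_cases hx : x = "*" <;> cases hs : hasStar xs <;>
          simp [specA, hasStar, h2, hx, hs, hcu, hm, List.replicate_succ']

theorem fix_stars_eq_specA (s : List String) : fix_stars s = specA false s := by
  show (((List.range s.length).reverse).foldl fsStep
      (((List.range s.length).foldl fsStep (s, false)).1, false)).1 = specA false s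
  have h1 := fold_fwd s [] false
  simp only [List.nil_append, List.length_nil, ← List.range_eq_range'] at h1
  rw [h1]
  dsimp only
  rw [show s.length = (fwdP false s).1.length from (fwdP_length false s).symm]
  have h2 := fold_bwd (fwdP false s).1 [] false
  simp only [List.append_nil] at h2
  rw [h2, bwd_fwd_spec s false]

theorem fix_stars_alt_eq_specA (s : List String) : fix_stars_alt s = specA false s := by
  show ((List.range (s.length + 1)).foldl (fsBStep s.length) (s, 0, false)).1 = specA false s
  have h := B_fold s [] [] (by simp)
  simp only [List.length_nil, List.nil_append, Nat.zero_add, Nat.add_zero, List.contains_nil,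
    ← List.range_eq_range'] at h
  rw [h]
  dsimp only
  have hb := seg_bridge s []
  simpa using hb

-- ===== VERDICT (by name: the statement is the Claim_ definition above) =====
theorem fix_stars_spec : Claim_equal_fix_stars := by
  intro symbols _
  unfold Spec_fix_stars
  rw [fix_stars_eq_specA, fix_stars_alt_eq_specA]
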